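-- pv_equiv track=rewrite | github.com/amuletofyendor/decision-ledger | decision_ledger/wiki_render.py | subject_prefixes
-- ===== SOURCE A (Python) =====
-- def subject_prefixes(root_subject: str, subjects: list[str]) -> set[str]:
--     prefixes = {root_subject}
--     root_parts = root_subject.split(".")
--     for subject in subjects:
--         parts = subject.split(".")
--         for index in range(len(root_parts), len(parts) + 1):
--             prefixes.add(".".join(parts[:index]))
--     return prefixes
-- ===== SOURCE B (Python) =====
-- def subject_prefixes(root_subject: str, subjects: list[str]) -> set[str]:
--     depth = len(root_subject.split("."))
--     prefixes = {root_subject}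
--     for subject in subjects:
--         acc = ""
--         count = 0
--         for part in subject.split("."):
--             acc = part if count == 0 else acc + "." + part
--             count += 1
--             if count >= depth:
--                 prefixes.add(acc)
--     return prefixes
-- ===== Notes on version B (the rewrite author's own statement) =====
-- stated objective: simpler
-- what changed: Replaces the per-subject index range with slicing and re-joining (".".join(parts[:index]) for each index) by a single incremental fold over the parts that extends one running joined string and adds it once the component count reaches the root depth.
import Mathlib
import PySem

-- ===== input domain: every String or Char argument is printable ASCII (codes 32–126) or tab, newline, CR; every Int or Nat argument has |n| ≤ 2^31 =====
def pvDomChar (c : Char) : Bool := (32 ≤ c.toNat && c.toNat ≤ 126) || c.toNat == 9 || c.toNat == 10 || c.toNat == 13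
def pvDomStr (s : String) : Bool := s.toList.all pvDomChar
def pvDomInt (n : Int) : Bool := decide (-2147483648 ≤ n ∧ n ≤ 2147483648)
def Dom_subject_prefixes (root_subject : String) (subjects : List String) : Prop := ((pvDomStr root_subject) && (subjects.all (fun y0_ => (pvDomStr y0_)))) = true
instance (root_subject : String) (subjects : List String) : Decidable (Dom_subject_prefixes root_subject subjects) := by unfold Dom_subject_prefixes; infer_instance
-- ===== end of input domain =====

-- B replaces A's per-subject range/slice/re-join inner loop by one incremental fold that
-- extends a single running joined string; objective: simpler (same asymptotic cost).

-- ===== PORT A =====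
-- subject.split(".") with the non-empty literal separator "." never raises, so split? is
-- always `some`; `.getD []` only unwraps it (the default is unreachable).
def subject_prefixes (root_subject : String) (subjects : List String) : List String :=
  let prefixes : PySem.Set String := PySem.Set.ofList [root_subject]
  let root_parts : List String := (PySem.Str.split? root_subject ".").getD []
  subjects.foldl (fun prefixes subject =>
    let parts : List String := (PySem.Str.split? subject ".").getD []
    (PySem.List.pyRange (root_parts.length : Int) ((parts.length : Int) + 1)).foldl
      (fun prefixes index =>
        PySem.Set.add prefixes (PySem.Str.join "." (PySem.List.slice parts none (some index))))
      prefixes) prefixes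

-- ===== PORT B =====
-- Python 'a + b' on str, ported exactly as code-point concatenation.
def pyStrAdd (a b : String) : String := String.ofList (a.toList ++ b.toList)

-- the body of B's inner loop: state (prefixes, acc, count)
def bstep (depth : Int) (st : PySem.Set String × String × Int) (part : String) :
    PySem.Set String × String × Int :=
  let acc := if st.2.2 = 0 then part else pyStrAdd (pyStrAdd st.2.1 ".") part
  let count := st.2.2 + 1
  (if depth ≤ count then PySem.Set.add st.1 acc else st.1, acc, count)

def subject_prefixes_alt (root_subject : String) (subjects : List String) : List String :=
  let depth : Int := (((PySem.Str.split? root_subject ".").getD []).length : Int)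
  let prefixes : PySem.Set String := PySem.Set.ofList [root_subject]
  subjects.foldl (fun prefixes subject =>
    (((PySem.Str.split? subject ".").getD []).foldl (bstep depth) (prefixes, "", 0)).1)
    prefixes

-- ===== PRECONDITION & SPEC =====
def Spec_subject_prefixes (root_subject : String) (subjects : List String) (out : List String) : Prop := out = subject_prefixes_alt root_subject subjects
instance (root_subject : String) (subjects : List String) (out : List String) : Decidable (Spec_subject_prefixes root_subject subjects out) := by unfold Spec_subject_prefixes; infer_instance

-- ===== CLAIM (what is proved, stated in full; the proofs are below) =====
def Claim_equal_subject_prefixes : Prop := ∀ (root_subject : String) (subjects : List String), Dom_subject_prefixes root_subject subjects → Spec_subject_prefixes root_subject subjects (subject_prefixes root_subject subjects)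

-- ===== LEMMAS AND PROOFS =====

lemma go_ne_nil (sep : List Char) : ∀ (fuel : Nat) (l cur : List Char) (acc : List (List Char)),
    PySem.Chars.splitOn.go sep fuel l cur acc ≠ [] := by
  intro fuel
  induction fuel with
  | zero => intro l cur acc; simp [PySem.Chars.splitOn.go]
  | succ n ih =>
    intro l cur acc
    cases l with
    | nil => simp [PySem.Chars.splitOn.go]
    | cons c rest =>
      rw [PySem.Chars.splitOn.go]
      split
      · exact ih _ _ _
      · exact ih _ _ _

lemma split_dot_ne_nil (s : String) : (PySem.Str.split? s ".").getD [] ≠ [] := by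
  have h := go_ne_nil ['.'] (s.toList.length + 1) s.toList [] []
  simp [PySem.Str.split?, PySem.Chars.split?, PySem.Chars.splitOn]
  exact h

lemma chars_join_snoc (sep x : List Char) : ∀ (l : List (List Char)), l ≠ [] →
    PySem.Chars.join sep (l ++ [x]) = PySem.Chars.join sep l ++ sep ++ x := by
  intro l
  induction l with
  | nil => simp
  | cons a t ih =>
    intro _
    cases t with
    | nil => simp [PySem.Chars.join_cons_cons, PySem.Chars.join_singleton]
    | cons b t2 =>
      have := ih (by simp)
      simp only [List.cons_append, PySem.Chars.join_cons_cons] at this ⊢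
      simp [this]

lemma join_snoc (pre : List String) (p : String) (h : pre ≠ []) :
    PySem.Str.join "." (pre ++ [p]) = pyStrAdd (pyStrAdd (PySem.Str.join "." pre) ".") p := by
  rw [← String.toList_inj]
  simp [PySem.Str.join, pyStrAdd, chars_join_snoc _ _ (pre.map String.toList) (by simpa using h)]

lemma join_single (p : String) : PySem.Str.join "." [p] = p := by
  simp [PySem.Str.join]

-- A's inner loop, rewritten over a Nat range of take-indices
lemma afold_eq (parts : List String) :
    ∀ (dn : Nat) (s : PySem.Set String),
    (PySem.List.pyRange (dn : Int) ((parts.length : Int) + 1)).foldl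
      (fun s i => PySem.Set.add s (PySem.Str.join "." (PySem.List.slice parts none (some i)))) s
    = (List.range' dn (parts.length + 1 - dn)).foldl
      (fun s k => PySem.Set.add s (PySem.Str.join "." (parts.take k))) s := by
  intro dn
  induction h : parts.length + 1 - dn generalizing dn with
  | zero =>
    intro s
    rw [PySem.List.pyRange_of_pos _ _ (by norm_num), if_neg (by omega)]
    simp
  | succ n ih =>
    intro s
    have hlt : (dn : Int) < (parts.length : Int) + 1 := by omega
    rw [PySem.List.pyRange_one_cons hlt]
    have := ih (dn + 1) (by push_cast; omega)
    push_cast at this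
    rw [List.foldl_cons, PySem.List.slice_to _ (by positivity)]
    rw [show ((dn : Int)).toNat = dn by omega]
    rw [show (List.range' dn (n + 1)) = dn :: List.range' (dn + 1) n from List.range'_succ]
    rw [List.foldl_cons]
    exact this _

-- B's inner loop invariant: with a non-empty prefix already joined into acc, the fold adds
-- exactly the joins of the takes whose length reaches depth
lemma bfold_inv (depth : Int) :
    ∀ (ps pre : List String), pre ≠ [] → ∀ (s : PySem.Set String),
    (ps.foldl (bstep depth) (s, PySem.Str.join "." pre, (pre.length : Int))).1
    = (List.range' (pre.length + 1) ps.length).foldl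
        (fun s (k : Nat) => if depth ≤ (k : Int) then
            PySem.Set.add s (PySem.Str.join "." ((pre ++ ps).take k)) else s) s := by
  intro ps
  induction ps with
  | nil => intro pre _ s; simp
  | cons p t ih =>
    intro pre hpre s
    have hlen : pre.length ≠ 0 := by simpa using hpre
    rw [List.foldl_cons]
    have hstep : bstep depth (s, PySem.Str.join "." pre, (pre.length : Int)) p
        = ((if depth ≤ ((pre.length : Int) + 1) then
              PySem.Set.add s (PySem.Str.join "." (pre ++ [p])) else s),
           PySem.Str.join "." (pre ++ [p]), ((pre ++ [p]).length : Int)) := by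
      simp only [bstep]
      rw [if_neg (show ¬((pre.length : Int) = 0) from by exact_mod_cast hlen)]
      rw [← join_snoc pre p hpre]
      simp
    rw [hstep, ih (pre ++ [p]) (by simp) _]
    have htake : (pre ++ p :: t).take (pre.length + 1) = pre ++ [p] := by
      rw [show pre ++ p :: t = (pre ++ [p]) ++ t by simp]
      exact List.take_left' (by simp)
    simp only [List.length_append, List.length_cons, List.append_assoc,
      List.singleton_append]
    rw [show List.range' (pre.length + 1) (t.length + 1)
          = (pre.length + 1) :: List.range' (pre.length + 1 + 1) t.length from List.range'_succ]
    rw [List.foldl_cons, htake]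
    push_cast
    rfl

-- folding an if-guarded add over indices all below the threshold does nothing
lemma foldl_if_skip (depth : Int) (g : Nat → String) :
    ∀ (l : List Nat) (s : PySem.Set String), (∀ k ∈ l, ¬ depth ≤ (k : Int)) →
    l.foldl (fun s (k : Nat) => if depth ≤ (k : Int) then PySem.Set.add s (g k) else s) s = s := by
  intro l
  induction l with
  | nil => intro s _; rfl
  | cons a t ih =>
    intro s h
    rw [List.foldl_cons, if_neg (h a (by simp))]
    exact ih s (fun k hk => h k (by simp [hk]))

-- over indices all at or above the threshold the guard is always true
lemma foldl_if_keep (depth : Int) (g : Nat → String) (l : List Nat)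
    (h : ∀ k ∈ l, depth ≤ (k : Int)) (s : PySem.Set String) :
    l.foldl (fun s (k : Nat) => if depth ≤ (k : Int) then PySem.Set.add s (g k) else s) s
    = l.foldl (fun s k => PySem.Set.add s (g k)) s := by
  refine PySem.List.foldl_congr_mem l _ _ s ?_
  intro acc k hk
  rw [if_pos (h k hk)]

-- the guarded fold over 1..n equals the unguarded fold over dn..n (dn ≥ 1)
lemma range_filter_eq (dn : Nat) (hdn : 1 ≤ dn) (n : Nat) (g : Nat → String)
    (s : PySem.Set String) :
    (List.range' 1 n).foldl
      (fun s (k : Nat) => if (dn : Int) ≤ (k : Int) then PySem.Set.add s (g k) else s) s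
    = (List.range' dn (n + 1 - dn)).foldl (fun s k => PySem.Set.add s (g k)) s := by
  by_cases hle : dn ≤ n
  · have hsplit : List.range' 1 n = List.range' 1 (dn - 1) ++ List.range' dn (n + 1 - dn) := by
      have := List.range'_append (s := 1) (m := dn - 1) (n := n + 1 - dn) (step := 1)
      rw [show 1 + 1 * (dn - 1) = dn by omega, show dn - 1 + (n + 1 - dn) = n by omega] at this
      exact this.symm
    rw [hsplit, List.foldl_append]
    rw [foldl_if_skip (dn : Int) g (List.range' 1 (dn - 1)) s (by
      intro k hk
      rw [List.mem_range'_1] at hk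
      omega)]
    exact foldl_if_keep _ _ _ (by
      intro k hk
      rw [List.mem_range'_1] at hk
      omega) s
  · rw [foldl_if_skip (dn : Int) g (List.range' 1 n) s (by
      intro k hk
      rw [List.mem_range'_1] at hk
      omega)]
    rw [show n + 1 - dn = 0 by omega]
    rfl

-- the two inner loops agree for any non-empty parts list and root depth dn ≥ 1
lemma inner_eq_parts (dn : Nat) (hdn : 1 ≤ dn) (parts : List String) (hp : parts ≠ [])
    (s : PySem.Set String) :
    (PySem.List.pyRange (dn : Int) ((parts.length : Int) + 1)).foldl
      (fun prefixes index =>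
        PySem.Set.add prefixes (PySem.Str.join "." (PySem.List.slice parts none (some index)))) s
    = (parts.foldl (bstep (dn : Int)) (s, "", 0)).1 := by
  obtain ⟨p0, ps, rfl⟩ : ∃ p0 ps, parts = p0 :: ps := by
    cases parts with
    | nil => exact absurd rfl hp
    | cons a t => exact ⟨a, t, rfl⟩
  rw [afold_eq]
  rw [List.foldl_cons]
  have hfirst : bstep (dn : Int) (s, "", 0) p0
      = ((if (dn : Int) ≤ 1 then PySem.Set.add s p0 else s), p0, 1) := by
    simp [bstep]
  rw [hfirst]
  have h1 : (1 : Int) = (([p0] : List String).length : Int) := by simp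
  have hJ : p0 = PySem.Str.join "." [p0] := (join_single p0).symm
  rw [show ((if (dn : Int) ≤ 1 then PySem.Set.add s p0 else s), p0, (1 : Int))
        = ((if (dn : Int) ≤ 1 then PySem.Set.add s p0 else s), PySem.Str.join "." [p0],
           (([p0] : List String).length : Int)) by rw [← hJ]; simp]
  rw [bfold_inv (dn : Int) ps [p0] (by simp)]
  have hmain := range_filter_eq dn hdn (ps.length + 1)
    (fun k => PySem.Str.join "." ((p0 :: ps).take k)) s
  rw [List.range'_succ, List.foldl_cons] at hmain
  norm_num [join_single] at hmain
  simpa using hmain.symm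

-- ===== VERDICT (by name: the statement is the Claim_ definition above) =====
theorem subject_prefixes_spec : Claim_equal_subject_prefixes := by
  intro root_subject subjects _
  unfold Spec_subject_prefixes
  have hdn : 1 ≤ ((PySem.Str.split? root_subject ".").getD []).length :=
    List.length_pos_iff.mpr (split_dot_ne_nil root_subject)
  simp only [subject_prefixes, subject_prefixes_alt]
  refine PySem.List.foldl_congr_mem subjects _ _ _ ?_
  intro acc subj _
  exact inner_eq_parts ((PySem.Str.split? root_subject ".").getD []).length hdn
    ((PySem.Str.split? subj ".").getD []) (split_dot_ne_nil subj) acc
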